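-- pv_equiv track=rewrite | github.com/srutherford2000/advent_of_code_2023 | 12_02/12_02.py | part2_marbles_power
-- ===== SOURCE A (Python) =====
-- def part2_marbles_power(game_info):
--     min_dict = {}
--     for round in game_info:
--         for color, count in round.items():
--             if (color not in min_dict) or (count > min_dict[color]):
--                 min_dict[color] = count
--
--     marble_power = 1
--     for value in min_dict.values():
--         marble_power *= value
--
--     return marble_power
-- ===== SOURCE B (Python) =====
-- def part2_marbles_power(game_info):
--     # first collect every color that appears, then rescan the rounds per color
--     colors = dict.fromkeys(c for r in game_info for c in r)
--     power = 1
--     for c in colors: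
--         power *= max(r[c] for r in game_info if c in r)
--     return power
-- ===== Notes on version B (the rewrite author's own statement) =====
-- stated objective: alternative
-- what changed: Instead of one pass accumulating a running-maximum dict and multiplying its values, B first collects the distinct colors and then, per color, rescans all rounds to take that color's maximum, multiplying the maxima directly.
import Mathlib
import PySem

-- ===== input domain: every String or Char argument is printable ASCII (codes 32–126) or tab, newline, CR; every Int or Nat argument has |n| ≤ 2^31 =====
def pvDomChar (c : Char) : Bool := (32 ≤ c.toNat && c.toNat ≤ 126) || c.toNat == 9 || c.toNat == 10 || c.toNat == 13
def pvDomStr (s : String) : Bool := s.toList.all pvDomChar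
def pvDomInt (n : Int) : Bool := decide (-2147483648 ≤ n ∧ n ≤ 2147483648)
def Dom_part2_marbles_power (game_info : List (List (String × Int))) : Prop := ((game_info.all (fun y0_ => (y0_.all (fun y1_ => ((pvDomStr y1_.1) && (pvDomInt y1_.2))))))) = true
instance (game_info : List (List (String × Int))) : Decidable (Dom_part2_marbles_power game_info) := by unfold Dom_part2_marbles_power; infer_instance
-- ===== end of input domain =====

-- B collects the distinct colors first and rescans the rounds per color for its maximum
-- (an alternative decomposition of A's single accumulating pass; same exact result).

-- ===== PORT A =====
-- each inner list is the Python dict `round` (duplicate keys: last value wins) — modelled by PySem.Dict.ofList;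
-- `getD _ 0` is only reached when the key is contained (Python's `or` short-circuits), so the default is never used.
def part2_marbles_power (game_info : List (List (String × Int))) : Int :=
  let min_dict : PySem.Dict String Int :=
    game_info.foldl (fun min_dict round =>
      (PySem.Dict.ofList round).items.foldl (fun min_dict p =>
        if !(min_dict.contains p.1) || decide (p.2 > min_dict.getD p.1 0)
        then min_dict.insert p.1 p.2 else min_dict) min_dict)
      PySem.Dict.empty
  min_dict.values.foldl (fun marble_power value => marble_power * value) 1

-- ===== PORT B =====
-- running maximum of `max(r[c] for r in game_info if c in r)`; `none` = no round contains c
def pvMaxForColor (c : String) (game_info : List (List (String × Int))) : Option Int :=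
  game_info.foldl (fun acc r =>
    match (PySem.Dict.ofList r).get? c with
    | none => acc
    | some v => match acc with
      | none => some v
      | some m => some (max m v)) none

def part2_marbles_power_alt (game_info : List (List (String × Int))) : Int :=
  let colors := PySem.List.dedup (game_info.flatMap (fun r => (PySem.Dict.ofList r).keys))
  colors.foldl (fun power c => power * (pvMaxForColor c game_info).getD 0) 1

-- ===== PRECONDITION & SPEC =====
def Spec_part2_marbles_power (game_info : List (List (String × Int))) (out : Int) : Prop := out = part2_marbles_power_alt game_info
instance (game_info : List (List (String × Int))) (out : Int) : Decidable (Spec_part2_marbles_power game_info out) := by unfold Spec_part2_marbles_power; infer_instance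

-- ===== CLAIM (what is proved, stated in full; the proofs are below) =====
def Claim_equal_part2_marbles_power : Prop := ∀ (game_info : List (List (String × Int))), Dom_part2_marbles_power game_info → Spec_part2_marbles_power game_info (part2_marbles_power game_info)

-- ===== LEMMAS AND PROOFS =====

-- A's inner-loop update step
def pvUpd (d : PySem.Dict String Int) (p : String × Int) : PySem.Dict String Int :=
  if !(d.contains p.1) || decide (p.2 > d.getD p.1 0) then d.insert p.1 p.2 else d

-- running max over a flat pair list, restricted to key c
def pvGmax (c : String) (l : List (String × Int)) (o : Option Int) : Option Int :=
  l.foldl (fun o p => if p.1 = c then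
      some (match o with | none => p.2 | some m => max m p.2) else o) o

theorem pv_foldl_flatMap {α β γ : Type} (l : List α) (g : α → List β) (f : γ → β → γ) (a : γ) :
    l.foldl (fun a x => (g x).foldl f a) a = (l.flatMap g).foldl f a := by
  induction l generalizing a with
  | nil => rfl
  | cons x xs ih => simp [List.flatMap_cons, List.foldl_append, ih]

theorem pvUpd_get? (d : PySem.Dict String Int) (p : String × Int) (c : String) :
    (pvUpd d p).get? c =
      if p.1 = c then some (match d.get? c with | none => p.2 | some m => max m p.2)
      else d.get? c := by
  unfold pvUpd
  by_cases hc : p.1 = c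
  · subst hc
    cases h : d.get? p.1 with
    | none =>
      have hcon : d.contains p.1 = false := by
        rw [PySem.Dict.contains_eq_isSome_get?, h]; rfl
      simp [hcon, PySem.Dict.get?_insert_self]
    | some m =>
      have hcon : d.contains p.1 = true := by
        rw [PySem.Dict.contains_eq_isSome_get?, h]; rfl
      have hgd : d.getD p.1 0 = m := PySem.Dict.getD_of_get?_eq_some d 0 h
      by_cases hlt : m < p.2
      · simp [hcon, hgd, hlt, PySem.Dict.get?_insert_self, max_eq_right (le_of_lt hlt)]
      · simp [hcon, hgd, hlt, h, max_eq_left (not_lt.mp hlt)]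
  · have hne : c ≠ p.1 := fun h => hc h.symm
    split
    · simp [PySem.Dict.get?_insert_of_ne d p.2 hne]
    · simp

theorem pv_foldl_upd_get? (l : List (String × Int)) (d : PySem.Dict String Int) (c : String) :
    (l.foldl pvUpd d).get? c = pvGmax c l (d.get? c) := by
  induction l generalizing d with
  | nil => rfl
  | cons p t ih =>
    simp only [List.foldl_cons, pvGmax, ih, pvUpd_get?]

theorem pvUpd_keys (d : PySem.Dict String Int) (p : String × Int) :
    (pvUpd d p).keys = PySem.Set.add d.keys p.1 := by
  unfold pvUpd
  by_cases hcon : d.contains p.1 = true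
  · have hmem : p.1 ∈ d.keys := (PySem.Dict.contains_iff_mem_keys d p.1).mp hcon
    have hadd : PySem.Set.add d.keys p.1 = d.keys := by
      simp [PySem.Set.add, PySem.Set.contains, hmem]
    split
    · rw [PySem.Dict.keys_insert_of_contains d p.2 hcon, hadd]
    · rw [hadd]
  · have hcon' : d.contains p.1 = false := Bool.not_eq_true _ ▸ eq_false_of_ne_true hcon
    have hmem : p.1 ∉ d.keys := fun h =>
      hcon ((PySem.Dict.contains_iff_mem_keys d p.1).mpr h)
    have hadd : PySem.Set.add d.keys p.1 = d.keys ++ [p.1] := by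
      simp [PySem.Set.add, PySem.Set.contains, hmem]
    simp [hcon', PySem.Dict.keys_insert_of_not_contains d p.2 hcon', hadd]

theorem pv_foldl_upd_keys (l : List (String × Int)) (d : PySem.Dict String Int) :
    (l.foldl pvUpd d).keys = PySem.Set.update d.keys (l.map (·.1)) := by
  induction l generalizing d with
  | nil => rfl
  | cons p t ih =>
    simp only [List.foldl_cons, List.map_cons, PySem.Set.update_cons, ih, pvUpd_keys]

theorem pv_foldl_upd_nodup (l : List (String × Int)) (d : PySem.Dict String Int)
    (h : d.keys.Nodup) : (l.foldl pvUpd d).keys.Nodup := by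
  induction l generalizing d with
  | nil => exact h
  | cons p t ih =>
    refine ih _ ?_
    unfold pvUpd
    split
    · exact PySem.Dict.nodup_keys_insert _ _ _ h
    · exact h

theorem pvGmax_append (c : String) (l₁ l₂ : List (String × Int)) (o : Option Int) :
    pvGmax c (l₁ ++ l₂) o = pvGmax c l₂ (pvGmax c l₁ o) := by
  simp [pvGmax, List.foldl_append]

theorem pvGmax_lookup (c : String) (l : List (String × Int))
    (hnd : (l.map (·.1)).Nodup) (o : Option Int) :
    pvGmax c l o =
      match (PySem.Dict.mk l).get? c with
      | none => o
      | some v => some (match o with | none => v | some m => max m v) := by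
  induction l generalizing o with
  | nil => rfl
  | cons p t ih =>
    rw [List.map_cons, List.nodup_cons] at hnd
    by_cases hc : p.1 = c
    · subst hc
      have htnone : (PySem.Dict.mk t).get? p.1 = none := by
        rw [PySem.Dict.get?_eq_none_iff_not_mem_keys, PySem.Dict.keys_mk]
        exact hnd.1
      have hstep : pvGmax p.1 (p :: t) o
          = pvGmax p.1 t (some (match o with | none => p.2 | some m => max m p.2)) := by
        simp [pvGmax]
      rw [hstep, ih hnd.2 _, htnone, PySem.Dict.get?_mk_cons]
      simp
    · have hstep : pvGmax c (p :: t) o = pvGmax c t o := by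
        simp [pvGmax, hc]
      have hbeq : (p.1 == c) = false := by
        simpa using hc
      rw [hstep, ih hnd.2 o, PySem.Dict.get?_mk_cons, hbeq]
      simp

theorem pvGmax_items (d : PySem.Dict String Int) (hnd : d.keys.Nodup) (c : String) (o : Option Int) :
    pvGmax c d.items o =
      match d.get? c with
      | none => o
      | some v => some (match o with | none => v | some m => max m v) := by
  obtain ⟨l⟩ := d
  rw [PySem.Dict.keys_mk] at hnd
  exact pvGmax_lookup c l hnd o

theorem pvGmax_eq_maxForColor (c : String) (game_info : List (List (String × Int))) :
    pvGmax c (game_info.flatMap (fun r => (PySem.Dict.ofList r).items)) none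
      = pvMaxForColor c game_info := by
  unfold pvMaxForColor
  induction game_info with
  | nil => rfl
  | cons r rs ih =>
    rw [List.flatMap_cons, pvGmax_append, List.foldl_cons]
    rw [pvGmax_items (PySem.Dict.ofList r) (PySem.Dict.nodup_keys_ofList r) c none]
    cases hr : (PySem.Dict.ofList r).get? c with
    | none =>
      simpa using ih
    | some v =>
      clear ih hr
      induction rs generalizing v with
      | nil => rfl
      | cons r' rs' ih' =>
        rw [List.flatMap_cons, pvGmax_append, List.foldl_cons]
        rw [pvGmax_items (PySem.Dict.ofList r') (PySem.Dict.nodup_keys_ofList r') c (some v)]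
        cases hr' : (PySem.Dict.ofList r').get? c with
        | none => exact ih' v
        | some w => exact ih' (max v w)

theorem pv_main (game_info : List (List (String × Int))) :
    part2_marbles_power game_info = part2_marbles_power_alt game_info := by
  show (game_info.foldl (fun min_dict round =>
      (PySem.Dict.ofList round).items.foldl (fun min_dict p =>
        if !(min_dict.contains p.1) || decide (p.2 > min_dict.getD p.1 0)
        then min_dict.insert p.1 p.2 else min_dict) min_dict)
      PySem.Dict.empty).values.foldl (fun marble_power value => marble_power * value) 1
    = (PySem.List.dedup (game_info.flatMap (fun r => (PySem.Dict.ofList r).keys))).foldl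
        (fun power c => power * (pvMaxForColor c game_info).getD 0) 1
  have hflat : game_info.foldl (fun min_dict round =>
      (PySem.Dict.ofList round).items.foldl (fun min_dict p =>
        if !(min_dict.contains p.1) || decide (p.2 > min_dict.getD p.1 0)
        then min_dict.insert p.1 p.2 else min_dict) min_dict)
      PySem.Dict.empty
      = (game_info.flatMap (fun r => (PySem.Dict.ofList r).items)).foldl pvUpd
          PySem.Dict.empty :=
    pv_foldl_flatMap game_info (fun r => (PySem.Dict.ofList r).items) pvUpd PySem.Dict.empty
  rw [hflat]
  set L := game_info.flatMap (fun r => (PySem.Dict.ofList r).items) with hL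
  set D := L.foldl pvUpd PySem.Dict.empty with hD
  have hnd : D.keys.Nodup := pv_foldl_upd_nodup L _ (PySem.Dict.nodup_keys_empty)
  have hkeys : D.keys = PySem.List.dedup (game_info.flatMap (fun r => (PySem.Dict.ofList r).keys)) := by
    rw [hD, pv_foldl_upd_keys]
    have hmap : L.map (·.1) = game_info.flatMap (fun r => (PySem.Dict.ofList r).keys) := by
      rw [hL, List.map_flatMap]
      rfl
    rw [hmap, PySem.List.dedup_eq_ofList]
    exact PySem.Set.update_nil_left _
  have hval : ∀ c : String, D.getD c 0 = (pvMaxForColor c game_info).getD 0 := by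
    intro c
    rw [PySem.Dict.getD_eq_get?_getD, hD, pv_foldl_upd_get?, PySem.Dict.get?_empty,
      ← pvGmax_eq_maxForColor c game_info]
  calc D.values.foldl (fun marble_power value => marble_power * value) 1
      = (D.keys.map (fun k => D.getD k 0)).foldl (fun p v => p * v) 1 := by
        rw [PySem.Dict.values_eq_map_keys D hnd 0]
    _ = D.keys.foldl (fun p k => p * D.getD k 0) 1 := by rw [List.foldl_map]
    _ = D.keys.foldl (fun p k => p * (pvMaxForColor k game_info).getD 0) 1 := by
        apply PySem.List.foldl_congr_mem
        intro acc x _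
        rw [hval x]
    _ = _ := by rw [hkeys]

-- ===== VERDICT (by name: the statement is the Claim_ definition above) =====
theorem part2_marbles_power_spec : Claim_equal_part2_marbles_power := by
  intro g _
  unfold Spec_part2_marbles_power
  exact pv_main g
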